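-- pv_equiv track=rewrite | github.com/TheoMF/advent_of_code_2024_solutions | puzzle2/main.py | reports_line_is_safe_part2
-- ===== SOURCE A (Python) =====
-- def reports_line_is_safe_part1(splitted_reports_line: list[int]) -> bool:
--     """
--     Return true if reports line is safe with conditions of the first part of the puzzle,
--     False otherwise.
--     """
--     is_increasing = splitted_reports_line[1] > splitted_reports_line[0]
--     for idx in range(len(splitted_reports_line) - 1):
--         value_gap = splitted_reports_line[idx + 1] - splitted_reports_line[idx]
--         if is_increasing and (value_gap < 1 or value_gap > 3):
--             return False
--         elif not is_increasing and (value_gap < -3 or value_gap > -1):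
--             return False
--     return True
--
-- def reports_line_is_safe_without_val_at_idx(
--     splitted_reports_line: list[int], idx_to_remove: int
-- ) -> bool:
--     """
--     Return true if reports line is safe with conditions of the first part of the puzzle,
--     but without a value at a chosen index, False otherwise.
--     """
--     del splitted_reports_line[idx_to_remove]
--     return reports_line_is_safe_part1(splitted_reports_line)
--
-- def reports_line_is_safe_without_val_at_one_of_idxs(
--     splitted_reports_line: list[int], idxs_to_remove: list[int]
-- ) -> bool:
--     """
--     Return true if reports line is safe with conditions of the first part of the puzzle,
--     but without the value at one of the index inside a list of indexes, False otherwise.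
--     """
--     for idx_to_remove in idxs_to_remove:
--         if reports_line_is_safe_without_val_at_idx(
--             splitted_reports_line.copy(), idx_to_remove
--         ):
--             return True
--     return False
--
-- def reports_line_is_safe_part2(splitted_reports_line: list[int]) -> bool:
--     """
--     Return true if reports line is safe with conditions of the second part of the puzzle,
--     False otherwise.
--     """
--     is_increasing = splitted_reports_line[1] > splitted_reports_line[0]
--     for idx in range(len(splitted_reports_line) - 1):
--         value_gap = splitted_reports_line[idx + 1] - splitted_reports_line[idx]
--         if is_increasing and (value_gap < 1 or value_gap > 3):
--             idxs_to_remove = [max(idx - 1, 0), idx, idx + 1]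
--             return reports_line_is_safe_without_val_at_one_of_idxs(
--                 splitted_reports_line, idxs_to_remove
--             )
--         if not is_increasing and (value_gap < -3 or value_gap > -1):
--             idxs_to_remove = [max(idx - 1, 0), idx, idx + 1]
--             return reports_line_is_safe_without_val_at_one_of_idxs(
--                 splitted_reports_line, idxs_to_remove
--             )
--     return True
-- ===== SOURCE B (Python) =====
-- def is_safe(r):
--     lo, hi = (1, 3) if r[1] > r[0] else (-3, -1)
--     return all(lo <= b - a <= hi for a, b in zip(r, r[1:]))
--
-- def reports_line_is_safe_part2(splitted_reports_line):
--     line = splitted_reports_line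
--     if is_safe(line):
--         return True
--     return any(is_safe(line[:i] + line[i + 1:]) for i in range(len(line)))
-- ===== Notes on version B (the rewrite author's own statement) =====
-- stated objective: idiomatic
-- what changed: Replaces A's first-violation scan with a localized 3-index removal window (plus three mutating helper functions) by the standard AoC day-2 formulation: one part1-style safety check, then 'safe after deleting some single index i' via slicing, tried for every i.
import Mathlib
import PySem

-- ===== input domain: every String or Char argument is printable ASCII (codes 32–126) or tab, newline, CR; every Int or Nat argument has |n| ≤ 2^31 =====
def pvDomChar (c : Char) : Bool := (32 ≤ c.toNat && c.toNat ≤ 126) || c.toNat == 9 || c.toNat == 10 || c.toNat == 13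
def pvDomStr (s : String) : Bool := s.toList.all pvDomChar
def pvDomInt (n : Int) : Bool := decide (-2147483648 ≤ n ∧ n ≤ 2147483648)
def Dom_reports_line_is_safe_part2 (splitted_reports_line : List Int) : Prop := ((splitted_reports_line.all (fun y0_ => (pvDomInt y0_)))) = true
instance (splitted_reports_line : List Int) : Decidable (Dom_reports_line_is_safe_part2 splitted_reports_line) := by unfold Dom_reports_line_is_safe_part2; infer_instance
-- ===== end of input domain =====

-- B replaces A's single localized "remove one of {idx-1, idx, idx+1}" patch at the first bad gap
-- by the plain "safe as-is, or safe after deleting some one index" recheck (objective: idiomatic).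
-- Neither Python mutates its argument (A's helpers work on copies).

-- ===== PORT A =====
-- for-loop of reports_line_is_safe_part1, over the remaining indices of range(len-1)
def pvLoop1A (xs : List Int) (inc : Bool) : List Int → Bool
  | [] => true
  | idx :: rest =>
    let value_gap := PySem.List.pyGetD xs (idx + 1) 0 - PySem.List.pyGetD xs idx 0
    if inc && (value_gap < 1 || value_gap > 3) then false
    else if !inc && (value_gap < -3 || value_gap > -1) then false
    else pvLoop1A xs inc rest

def reports_line_is_safe_part1_A (xs : List Int) : Bool :=
  let is_increasing := decide (PySem.List.pyGetD xs 1 0 > PySem.List.pyGetD xs 0 0)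
  pvLoop1A xs is_increasing (PySem.List.pyRange 0 ((xs.length : Int) - 1) 1)

-- del splitted_reports_line[idx]; exact here: A only calls it with 0 ≤ idx < len
def reports_line_is_safe_without_val_at_idx_A (xs : List Int) (idx : Int) : Bool :=
  reports_line_is_safe_part1_A (xs.eraseIdx idx.toNat)

-- for-loop of reports_line_is_safe_without_val_at_one_of_idxs (early return True)
def reports_line_is_safe_without_val_at_one_of_idxs_A (xs : List Int) : List Int → Bool
  | [] => false
  | idx_to_remove :: rest =>
    if reports_line_is_safe_without_val_at_idx_A xs idx_to_remove then true
    else reports_line_is_safe_without_val_at_one_of_idxs_A xs rest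

-- for-loop of reports_line_is_safe_part2 (early return of the window recheck)
def pvLoop2A (xs : List Int) (inc : Bool) : List Int → Bool
  | [] => true
  | idx :: rest =>
    let value_gap := PySem.List.pyGetD xs (idx + 1) 0 - PySem.List.pyGetD xs idx 0
    if inc && (value_gap < 1 || value_gap > 3) then
      reports_line_is_safe_without_val_at_one_of_idxs_A xs [max (idx - 1) 0, idx, idx + 1]
    else if !inc && (value_gap < -3 || value_gap > -1) then
      reports_line_is_safe_without_val_at_one_of_idxs_A xs [max (idx - 1) 0, idx, idx + 1]
    else pvLoop2A xs inc rest

def reports_line_is_safe_part2 (splitted_reports_line : List Int) : Bool :=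
  let is_increasing := decide (PySem.List.pyGetD splitted_reports_line 1 0 > PySem.List.pyGetD splitted_reports_line 0 0)
  pvLoop2A splitted_reports_line is_increasing (PySem.List.pyRange 0 ((splitted_reports_line.length : Int) - 1) 1)

-- ===== PORT B =====
def pvIsSafeB (r : List Int) : Bool :=
  let lohi : Int × Int :=
    if PySem.List.pyGetD r 1 0 > PySem.List.pyGetD r 0 0 then (1, 3) else (-3, -1)
  (r.zip (PySem.List.slice r (some 1) none)).all fun p =>
    decide (lohi.1 ≤ p.2 - p.1) && decide (p.2 - p.1 ≤ lohi.2)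

def reports_line_is_safe_part2_alt (splitted_reports_line : List Int) : Bool :=
  if pvIsSafeB splitted_reports_line then true
  else
    (PySem.List.pyRange 0 (splitted_reports_line.length : Int) 1).any fun i =>
      pvIsSafeB (PySem.List.slice splitted_reports_line none (some i) ++
                 PySem.List.slice splitted_reports_line (some (i + 1)) none)

-- ===== PRECONDITION & SPEC =====
-- Pre_ excludes exactly the inputs where Python A raises IndexError: lists shorter than 2,
-- and unsafe 2-element lists (there the removal recheck runs part1 on a 1-element list).
def Pre_reports_line_is_safe_part2 (splitted_reports_line : List Int) : Prop :=
  2 ≤ splitted_reports_line.length ∧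
  (splitted_reports_line.length = 2 →
    (1 ≤ splitted_reports_line.getD 1 0 - splitted_reports_line.getD 0 0 ∧
      splitted_reports_line.getD 1 0 - splitted_reports_line.getD 0 0 ≤ 3) ∨
    (-3 ≤ splitted_reports_line.getD 1 0 - splitted_reports_line.getD 0 0 ∧
      splitted_reports_line.getD 1 0 - splitted_reports_line.getD 0 0 ≤ -1))
instance (splitted_reports_line : List Int) : Decidable (Pre_reports_line_is_safe_part2 splitted_reports_line) := by
  unfold Pre_reports_line_is_safe_part2; infer_instance

def pvWitness_reports_line_is_safe_part2 : List Int := [1, 2, 4, 3]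

def Spec_reports_line_is_safe_part2 (splitted_reports_line : List Int) (out : Bool) : Prop := out = reports_line_is_safe_part2_alt splitted_reports_line
instance (splitted_reports_line : List Int) (out : Bool) : Decidable (Spec_reports_line_is_safe_part2 splitted_reports_line out) := by unfold Spec_reports_line_is_safe_part2; infer_instance

-- ===== CLAIM (what is proved, stated in full; the proofs are below) =====
def Claim_equal_reports_line_is_safe_part2 : Prop := ∀ (splitted_reports_line : List Int), Dom_reports_line_is_safe_part2 splitted_reports_line → Pre_reports_line_is_safe_part2 splitted_reports_line → Spec_reports_line_is_safe_part2 splitted_reports_line (reports_line_is_safe_part2 splitted_reports_line)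

-- ===== LEMMAS AND PROOFS =====

-- canonical "part-1 safe" predicate both implementations compute (proof-side only)
def pvOk (inc : Bool) (g : Int) : Bool :=
  if inc then decide (1 ≤ g ∧ g ≤ 3) else decide (-3 ≤ g ∧ g ≤ -1)

def pvGap (xs : List Int) (k : Nat) : Int := xs.getD (k + 1) 0 - xs.getD k 0

def pvInc (xs : List Int) : Bool := decide (xs.getD 1 0 > xs.getD 0 0)

def pvSafe (xs : List Int) : Bool :=
  (List.range (xs.length - 1)).all fun k => pvOk (pvInc xs) (pvGap xs k)

theorem gap_cast (xs : List Int) (s : Nat) :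
    PySem.List.pyGetD xs ((s : Int) + 1) 0 - PySem.List.pyGetD xs (s : Int) 0 = pvGap xs s := by
  have : ((s : Int) + 1) = ((s + 1 : Nat) : Int) := by push_cast; ring
  rw [this, PySem.List.pyGetD_natCast, PySem.List.pyGetD_natCast, pvGap]

theorem branch_char (inc : Bool) (g : Int) :
    (inc && (g < 1 || g > 3) : Bool) = false ∧ (!inc && (g < -3 || g > -1) : Bool) = false ↔ pvOk inc g = true := by
  cases inc
  · simp [pvOk]
  · simp [pvOk]

theorem pvLoop1A_iff (xs : List Int) (inc : Bool) (s : Nat) :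
    pvLoop1A xs inc (PySem.List.pyRange (s : Int) ((xs.length : Int) - 1) 1) = true ↔
      ∀ k : Nat, s ≤ k → k + 1 < xs.length → pvOk inc (pvGap xs k) = true := by
  have H : ∀ (m s : Nat), xs.length - 1 - s ≤ m →
      (pvLoop1A xs inc (PySem.List.pyRange (s : Int) ((xs.length : Int) - 1) 1) = true ↔
        ∀ k : Nat, s ≤ k → k + 1 < xs.length → pvOk inc (pvGap xs k) = true) := by
    intro m
    induction m with
    | zero =>
      intro s hs
      rw [PySem.List.pyRange_one_eq_nil (by omega)]
      simp [pvLoop1A]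
      intro k hk hk1; omega
    | succ m ih =>
      intro s hs
      by_cases h : (s : Int) < (xs.length : Int) - 1
      · rw [PySem.List.pyRange_one_cons h]
        have hs1 : s + 1 < xs.length := by omega
        show (if inc && _ then false else if !inc && _ then false else _) = true ↔ _
        rw [gap_cast]
        by_cases hok : pvOk inc (pvGap xs s) = true
        · have hb := (branch_char inc (pvGap xs s)).mpr hok
          rw [hb.1, hb.2]
          simp only [if_false, Bool.false_eq_true]
          rw [show ((s : Int) + 1) = ((s + 1 : Nat) : Int) by push_cast; ring]
          rw [ih (s + 1) (by omega)]
          constructor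
          · intro hall k hk hk1
            rcases Nat.eq_or_lt_of_le hk with rfl | h2
            · exact hok
            · exact hall k h2 hk1
          · intro hall k hk hk1; exact hall k (by omega) hk1
        · have : ¬((inc && (pvGap xs s < 1 || pvGap xs s > 3) : Bool) = false ∧
              (!inc && (pvGap xs s < -3 || pvGap xs s > -1) : Bool) = false) := by
            intro hc; exact hok ((branch_char inc (pvGap xs s)).mp hc)
          constructor
          · intro hres
            exfalso
            rcases Bool.eq_false_or_eq_true (inc && (pvGap xs s < 1 || pvGap xs s > 3)) with h1 | h1
            · rw [h1] at hres; simp at hres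
            · rcases Bool.eq_false_or_eq_true (!inc && (pvGap xs s < -3 || pvGap xs s > -1)) with h2 | h2
              · rw [h1, h2] at hres; simp at hres
              · exact this ⟨h1, h2⟩
          · intro hall
            exact absurd ((branch_char inc (pvGap xs s)).mpr (hall s le_rfl hs1)) (fun hb => hok ((branch_char _ _).mp hb))
      · rw [PySem.List.pyRange_one_eq_nil (by omega)]
        simp [pvLoop1A]
        intro k hk hk1; omega
  exact H (xs.length - 1 - s) s le_rfl

theorem inc_cast (xs : List Int) :
    decide (PySem.List.pyGetD xs 1 0 > PySem.List.pyGetD xs 0 0) = pvInc xs := by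
  simp [pysem, pvInc]

theorem part1A_eq_safe (xs : List Int) : reports_line_is_safe_part1_A xs = pvSafe xs := by
  show pvLoop1A xs _ _ = _
  rw [inc_cast]
  rw [show (0:Int) = ((0:Nat):Int) by norm_num]
  rw [Bool.eq_iff_iff, pvLoop1A_iff, pvSafe, List.all_eq_true]
  constructor
  · intro h k hk
    rw [List.mem_range] at hk
    exact h k (Nat.zero_le _) (by omega)
  · intro h k _ hk1
    exact h k (by rw [List.mem_range]; omega)

theorem zip_adj_all (f : Int × Int → Bool) (xs : List Int) :
    (xs.zip xs.tail).all f = (List.range (xs.length - 1)).all fun k => f (xs.getD k 0, xs.getD (k + 1) 0) := by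
  induction xs with
  | nil => simp
  | cons x ys ih =>
    cases ys with
    | nil => simp
    | cons y zs =>
      have h1 : (x :: y :: zs : List Int).length - 1 = (zs.length) + 1 := by simp
      rw [h1, List.range_succ_eq_map]
      simp only [List.tail_cons, List.zip_cons_cons, List.all_cons, List.all_map]
      rw [show ((y :: zs : List Int).zip zs).all f = ((y :: zs : List Int).zip (y :: zs : List Int).tail).all f by rfl, ih]
      have h2 : (y :: zs : List Int).length - 1 = zs.length := by simp
      rw [h2]
      congr 1

theorem isSafeB_eq_safe (xs : List Int) : pvIsSafeB xs = pvSafe xs := by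
  show (xs.zip (PySem.List.slice xs (some 1) none)).all _ = _
  rw [PySem.List.slice_from_one, zip_adj_all, pvSafe]
  have h1 : PySem.List.pyGetD xs 1 0 = xs.getD 1 0 := by simp [pysem]
  have h0 : PySem.List.pyGetD xs 0 0 = xs.getD 0 0 := by simp [pysem]
  rw [h1, h0]
  congr 1
  funext k
  by_cases h : xs.getD 1 0 > xs.getD 0 0
  · simp only [if_pos h, pvInc, pvOk, pvGap, decide_eq_true h]; simp
  · simp only [if_neg h, pvInc, pvOk, pvGap, decide_eq_false h]; simp

theorem getD_eraseIdx (xs : List Int) (j k : Nat) :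
    (xs.eraseIdx j).getD k 0 = if k < j then xs.getD k 0 else xs.getD (k + 1) 0 := by
  simp only [List.getD_eq_getElem?_getD, List.getElem?_eraseIdx]
  split <;> rfl

theorem outside_window_unsafe (xs : List Int) (s j : Nat)
    (hs1 : s + 1 < xs.length)
    (hpre : ∀ k : Nat, k < s → k + 1 < xs.length → pvOk (pvInc xs) (pvGap xs k) = true)
    (hviol : pvOk (pvInc xs) (pvGap xs s) = false)
    (hj : j < xs.length) (hout : j + 2 ≤ s ∨ s + 2 ≤ j) :
    pvSafe (xs.eraseIdx j) = false := by
  have hlen : (xs.eraseIdx j).length = xs.length - 1 := by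
    rw [List.length_eraseIdx]; simp [hj]
  have hinc : pvInc (xs.eraseIdx j) = pvInc xs := by
    have hrw : pvInc (xs.eraseIdx j) =
        decide ((if 1 < j then xs.getD 1 0 else xs.getD 2 0) >
          (if 0 < j then xs.getD 0 0 else xs.getD 1 0)) := by
      unfold pvInc
      rw [getD_eraseIdx, getD_eraseIdx]
    rcases Nat.lt_or_ge j 2 with hj2 | hj2
    · -- j = 0 or j = 1; then j + 2 ≤ s (since s + 2 ≤ j is impossible)
      have hjs : j + 2 ≤ s := by omega
      have hok1 : pvOk (pvInc xs) (pvGap xs 1) = true := hpre 1 (by omega) (by omega)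
      have hok0 : pvOk (pvInc xs) (pvGap xs 0) = true := hpre 0 (by omega) (by omega)
      unfold pvOk pvGap at hok1 hok0
      interval_cases j
      · rw [hrw, if_neg (by omega : ¬ (1:Nat) < 0), if_neg (by omega : ¬ (0:Nat) < 0)]
        cases hI : pvInc xs <;> rw [hI] at hok1 <;> simp at hok1 ⊢ <;> omega
      · rw [hrw, if_pos (by omega : (0:Nat) < 1), if_neg (by omega : ¬ (1:Nat) < 1)]
        cases hI : pvInc xs <;> rw [hI] at hok1 hok0 <;> simp at hok1 hok0 ⊢ <;> omega
    · rw [hrw, if_pos (by omega : 0 < j), if_pos (by omega : 1 < j)]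
      rfl
  rw [pvSafe, List.all_eq_false]
  rcases hout with hlt | hgt
  · -- j + 2 ≤ s : witness index s - 1
    refine ⟨s - 1, by rw [List.mem_range]; omega, ?_⟩
    have hgap : pvGap (xs.eraseIdx j) (s - 1) = pvGap xs s := by
      unfold pvGap
      rw [getD_eraseIdx, getD_eraseIdx, if_neg (by omega), if_neg (by omega)]
      have e1 : s - 1 + 1 = s := by omega
      rw [e1]
    rw [hinc, hgap, hviol]; simp
  · -- s + 2 ≤ j : witness index s
    refine ⟨s, by rw [List.mem_range]; omega, ?_⟩
    have hgap : pvGap (xs.eraseIdx j) s = pvGap xs s := by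
      unfold pvGap
      rw [getD_eraseIdx, getD_eraseIdx, if_pos (by omega), if_pos (by omega)]
    rw [hinc, hgap, hviol]; simp

theorem alt_char (xs : List Int) :
    reports_line_is_safe_part2_alt xs =
      if pvSafe xs then true
      else (List.range xs.length).any fun j => pvSafe (xs.eraseIdx j) := by
  rw [reports_line_is_safe_part2_alt, isSafeB_eq_safe]
  congr 1
  rw [PySem.List.pyRange_zero_nat, List.any_map]
  congr 1
  funext k
  show pvIsSafeB _ = _
  rw [PySem.List.slice_to_natCast,
    show ((k : Int) + 1) = ((k + 1 : Nat) : Int) by push_cast; ring,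
    PySem.List.slice_from_natCast, isSafeB_eq_safe, ← List.eraseIdx_eq_take_drop_succ]

theorem window_any (xs : List Int) (s : Nat) :
    reports_line_is_safe_without_val_at_one_of_idxs_A xs [max ((s:Int) - 1) 0, (s:Int), (s:Int) + 1] = true ↔
      pvSafe (xs.eraseIdx (s - 1)) = true ∨ pvSafe (xs.eraseIdx s) = true ∨ pvSafe (xs.eraseIdx (s + 1)) = true := by
  have t1 : (max ((s:Int) - 1) 0).toNat = s - 1 := by omega
  have t2 : ((s:Int)).toNat = s := by omega
  have t3 : ((s:Int) + 1).toNat = s + 1 := by omega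
  show (if reports_line_is_safe_without_val_at_idx_A xs _ then true else
    if reports_line_is_safe_without_val_at_idx_A xs _ then true else
    if reports_line_is_safe_without_val_at_idx_A xs _ then true else false) = true ↔ _
  unfold reports_line_is_safe_without_val_at_idx_A
  rw [t1, t2, t3, part1A_eq_safe, part1A_eq_safe, part1A_eq_safe]
  by_cases h1 : pvSafe (xs.eraseIdx (s - 1)) = true <;>
    by_cases h2 : pvSafe (xs.eraseIdx s) = true <;>
    by_cases h3 : pvSafe (xs.eraseIdx (s + 1)) = true <;>
    simp [h1, h2, h3]

theorem pvLoop2A_eq (xs : List Int) (s : Nat)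
    (hpre : ∀ k : Nat, k < s → k + 1 < xs.length → pvOk (pvInc xs) (pvGap xs k) = true) :
    pvLoop2A xs (pvInc xs) (PySem.List.pyRange (s : Int) ((xs.length : Int) - 1) 1) =
      reports_line_is_safe_part2_alt xs := by
  have H : ∀ (m s : Nat), xs.length - 1 - s ≤ m →
      (∀ k : Nat, k < s → k + 1 < xs.length → pvOk (pvInc xs) (pvGap xs k) = true) →
      pvLoop2A xs (pvInc xs) (PySem.List.pyRange (s : Int) ((xs.length : Int) - 1) 1) =
        reports_line_is_safe_part2_alt xs := by
    intro m
    induction m with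
    | zero =>
      intro s hs hpre
      rw [PySem.List.pyRange_one_eq_nil (by omega)]
      have hsafe : pvSafe xs = true := by
        rw [pvSafe, List.all_eq_true]
        intro k hk
        rw [List.mem_range] at hk
        exact hpre k (by omega) (by omega)
      rw [alt_char, if_pos hsafe]
      rfl
    | succ m ih =>
      intro s hs hpre
      by_cases h : (s : Int) < (xs.length : Int) - 1
      · rw [PySem.List.pyRange_one_cons h]
        have hs1 : s + 1 < xs.length := by omega
        show (if (pvInc xs) && _ then _ else if !(pvInc xs) && _ then _ else _) = _
        rw [gap_cast]
        by_cases hok : pvOk (pvInc xs) (pvGap xs s) = true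
        · have hb := (branch_char (pvInc xs) (pvGap xs s)).mpr hok
          rw [hb.1, hb.2]
          simp only [if_false, Bool.false_eq_true]
          rw [show ((s : Int) + 1) = ((s + 1 : Nat) : Int) by push_cast; ring]
          apply ih (s + 1) (by omega)
          intro k hk hk1
          rcases Nat.lt_or_ge k s with h2 | h2
          · exact hpre k h2 hk1
          · have : k = s := by omega
            subst this; exact hok
        · have hviol : pvOk (pvInc xs) (pvGap xs s) = false := by
            cases hx : pvOk (pvInc xs) (pvGap xs s)
            · rfl
            · exact absurd hx hok
          have hsafeF : pvSafe xs = false := by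
            rw [pvSafe, List.all_eq_false]
            exact ⟨s, by rw [List.mem_range]; omega, by rw [hviol]; simp⟩
          have hW : (if (pvInc xs) && (pvGap xs s < 1 || pvGap xs s > 3) then
              reports_line_is_safe_without_val_at_one_of_idxs_A xs [max ((s:Int) - 1) 0, (s:Int), (s:Int) + 1]
            else if !(pvInc xs) && (pvGap xs s < -3 || pvGap xs s > -1) then
              reports_line_is_safe_without_val_at_one_of_idxs_A xs [max ((s:Int) - 1) 0, (s:Int), (s:Int) + 1]
            else pvLoop2A xs (pvInc xs) (PySem.List.pyRange ((s:Int) + 1) ((xs.length : Int) - 1) 1)) =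
              reports_line_is_safe_without_val_at_one_of_idxs_A xs [max ((s:Int) - 1) 0, (s:Int), (s:Int) + 1] := by
            rcases Bool.eq_false_or_eq_true ((pvInc xs) && (pvGap xs s < 1 || pvGap xs s > 3)) with h1 | h1
            · rw [h1, if_pos rfl]
            · rcases Bool.eq_false_or_eq_true ((!(pvInc xs)) && (pvGap xs s < -3 || pvGap xs s > -1)) with h2 | h2
              · rw [h1, h2]; simp
              · exact absurd ((branch_char _ _).mp ⟨h1, h2⟩) hok
          rw [hW, alt_char, if_neg (by rw [hsafeF]; simp), Bool.eq_iff_iff, window_any, List.any_eq_true]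
          constructor
          · rintro (hA | hA | hA)
            · exact ⟨s - 1, by rw [List.mem_range]; omega, hA⟩
            · exact ⟨s, by rw [List.mem_range]; omega, hA⟩
            · exact ⟨s + 1, by rw [List.mem_range]; omega, hA⟩
          · rintro ⟨j, hjm, hjs⟩
            rw [List.mem_range] at hjm
            by_cases hout : j + 2 ≤ s ∨ s + 2 ≤ j
            · exact absurd hjs (by rw [outside_window_unsafe xs s j hs1 hpre hviol hjm hout]; simp)
            · have : j = s - 1 ∨ j = s ∨ j = s + 1 := by omega
              rcases this with rfl | rfl | rfl
              · exact Or.inl hjs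
              · exact Or.inr (Or.inl hjs)
              · exact Or.inr (Or.inr hjs)
      · rw [PySem.List.pyRange_one_eq_nil (by omega)]
        have hsafe : pvSafe xs = true := by
          rw [pvSafe, List.all_eq_true]
          intro k hk
          rw [List.mem_range] at hk
          exact hpre k (by omega) (by omega)
        rw [alt_char, if_pos hsafe]
        rfl
  exact H (xs.length - 1 - s) s le_rfl hpre

theorem main_eq (xs : List Int) :
    reports_line_is_safe_part2 xs = reports_line_is_safe_part2_alt xs := by
  show pvLoop2A xs _ _ = _
  rw [inc_cast, show (0 : Int) = ((0 : Nat) : Int) by norm_num]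
  exact pvLoop2A_eq xs 0 (by intro k hk; omega)

-- ===== VERDICT (by name: the statement is the Claim_ definition above) =====
theorem reports_line_is_safe_part2_spec : Claim_equal_reports_line_is_safe_part2 := by
  intro xs _ _
  unfold Spec_reports_line_is_safe_part2
  exact main_eq xs
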